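-- pv_equiv track=rewrite | github.com/Adarsh-Dhar/cart-blanche-mlh-do | server/agents/catalog.py | _name_subphrases
-- ===== SOURCE A (Python) =====
-- def _name_subphrases(name: str) -> list[str]:
--     """
--     All suffix sub-phrases of a product name that start with a non-numeric word.
--     "100 Hours H100 GPU Cluster" → ["H100 GPU Cluster", "GPU Cluster", "H100", "GPU", "Cluster"]
--     """
--     parts  = name.split()
--     result: list[str] = []
--     for i in range(len(parts)):
--         if parts[i][0].isdigit():
--             continue
--         phrase = " ".join(parts[i:])
--         if phrase != name and len(phrase) > 2:
--             result.append(phrase)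
--     # Individual capitalised tokens
--     for part in parts:
--         clean = part.strip("()[]")
--         if len(clean) >= 3 and not clean.isdigit() and clean[0].isupper():
--             if clean not in result:
--                 result.append(clean)
--     return result
-- ===== SOURCE B (Python) =====
-- def _name_subphrases(name: str) -> list[str]:
--     # Build each suffix phrase incrementally right-to-left instead of re-joining parts[i:] per index.
--     parts = name.split()
--     rev_suffixes: list[str] = []
--     suffix = None
--     for part in reversed(parts):
--         suffix = part if suffix is None else part + " " + suffix
--         if not part[0].isdigit() and suffix != name and len(suffix) > 2:
--             rev_suffixes.append(suffix)
--     result = rev_suffixes[::-1]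
--     for part in parts:
--         clean = part.strip("()[]")
--         if len(clean) >= 3 and not clean.isdigit() and clean[0].isupper() and clean not in result:
--             result.append(clean)
--     return result
-- ===== Notes on version B (the rewrite author's own statement) =====
-- stated objective: alternative
-- what changed: Phase 1 no longer slices and re-joins parts[i:] for each index: a single right-to-left pass builds every suffix phrase incrementally with an accumulator and the collected list is reversed to restore forward order.
import Mathlib
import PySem

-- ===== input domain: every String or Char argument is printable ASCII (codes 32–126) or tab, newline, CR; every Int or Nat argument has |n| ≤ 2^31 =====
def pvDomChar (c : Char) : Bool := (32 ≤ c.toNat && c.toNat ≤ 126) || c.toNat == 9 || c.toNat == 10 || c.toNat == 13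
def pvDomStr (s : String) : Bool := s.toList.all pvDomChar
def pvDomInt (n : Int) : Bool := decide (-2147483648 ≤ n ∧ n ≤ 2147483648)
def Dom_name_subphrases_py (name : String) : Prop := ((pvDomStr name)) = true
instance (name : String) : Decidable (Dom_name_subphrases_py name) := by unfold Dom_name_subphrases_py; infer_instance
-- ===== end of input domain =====

-- B builds each suffix phrase incrementally in one right-to-left pass with an accumulator
-- instead of slicing and re-joining parts[i:] for every index; same return value (alternative decomposition).


-- ===== PORT A =====
-- parts[i][0] is ported as .toList.headD ' ': exact, since split() yields only non-empty words.
def name_subphrases_py (name : String) : List String :=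
  let parts := PySem.Str.split₀ name
  let result : List String :=
    (PySem.List.pyRange 0 parts.length 1).foldl
      (fun res i =>
        if PySem.Chars.isdigit ((PySem.List.pyGetD parts i "").toList.headD ' ') then res
        else
          let phrase := PySem.Str.join " " (PySem.List.slice parts (some i) none)
          if phrase ≠ name ∧ 2 < PySem.Str.len phrase then res ++ [phrase] else res)
      []
  parts.foldl
    (fun res part =>
      let clean := PySem.Str.stripChars part "()[]"
      if 3 ≤ PySem.Str.len clean ∧ ¬ PySem.Str.strIsdigit clean
          ∧ PySem.Chars.isupper (clean.toList.headD ' ') then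
        if clean ∈ res then res else res ++ [clean]
      else res)
    result

-- ===== PORT B =====
-- Python's conditional expression 'part if suffix is None else part + " " + suffix':
def pvExtend (part : String) : Option String → String
  | none => part
  | some t => part ++ " " ++ t

-- 'for part in reversed(parts)' is parts.reverse.foldl; rev_suffixes[::-1] is .reverse
-- (PySem.List.slice?_none_none_neg_one); part[0] as .toList.headD ' ' (split() words are non-empty).
def name_subphrases_py_alt (name : String) : List String :=
  let parts := PySem.Str.split₀ name
  let st :=
    parts.reverse.foldl
      (fun (st : Option String × List String) part =>
        let suffix := pvExtend part st.1
        (some suffix,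
          if ¬ PySem.Chars.isdigit (part.toList.headD ' ') ∧ suffix ≠ name
              ∧ 2 < PySem.Str.len suffix
          then st.2 ++ [suffix] else st.2))
      (none, [])
  let result := st.2.reverse
  parts.foldl
    (fun res part =>
      let clean := PySem.Str.stripChars part "()[]"
      if 3 ≤ PySem.Str.len clean ∧ ¬ PySem.Str.strIsdigit clean
          ∧ PySem.Chars.isupper (clean.toList.headD ' ')
          ∧ clean ∉ res then
        res ++ [clean]
      else res)
    result

-- ===== PRECONDITION & SPEC =====
def Spec_name_subphrases_py (name : String) (out : List String) : Prop := out = name_subphrases_py_alt name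
instance (name : String) (out : List String) : Decidable (Spec_name_subphrases_py name out) := by unfold Spec_name_subphrases_py; infer_instance

-- ===== CLAIM (what is proved, stated in full; the proofs are below) =====
def Claim_equal_name_subphrases_py : Prop := ∀ (name : String), Dom_name_subphrases_py name → Spec_name_subphrases_py name (name_subphrases_py name)

-- ===== LEMMAS AND PROOFS =====

-- the common value of both phase-1 loops, as a structural recursion
def pvSpec (name : String) : List String → List String
  | [] => []
  | p :: rest =>
      (if ¬ PySem.Chars.isdigit (p.toList.headD ' ')
          ∧ PySem.Str.join " " (p :: rest) ≠ name
          ∧ 2 < PySem.Str.len (PySem.Str.join " " (p :: rest))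
       then [PySem.Str.join " " (p :: rest)] else [])
      ++ pvSpec name rest

-- A's loop body with the Nat index already resolved through getD / drop
def pvStepN (name : String) (parts : List String) (res : List String) (k : Nat) : List String :=
  if PySem.Chars.isdigit ((parts.getD k "").toList.headD ' ') then res
  else
    let phrase := PySem.Str.join " " (parts.drop k)
    if phrase ≠ name ∧ 2 < PySem.Str.len phrase then res ++ [phrase] else res

theorem pvStepN_cons (name p : String) (rest res : List String) (k : Nat) :
    pvStepN name (p :: rest) res (k + 1) = pvStepN name rest res k := by
  simp [pvStepN]

theorem pvFoldl_stepN (name : String) :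
    ∀ (parts : List String) (acc : List String),
      (List.range parts.length).foldl (pvStepN name parts) acc = acc ++ pvSpec name parts := by
  intro parts
  induction parts with
  | nil => intro acc; simp [pvSpec]
  | cons p rest ih =>
    intro acc
    rw [List.length_cons, List.range_succ_eq_map]
    simp only [List.foldl_cons, List.foldl_map]
    have h1 : (fun (res : List String) (k : Nat) => pvStepN name (p :: rest) res (k.succ))
        = pvStepN name rest := by
      funext res k; exact pvStepN_cons name p rest res k
    rw [h1, ih]
    have h0 : pvStepN name (p :: rest) acc 0
        = acc ++ (if ¬ PySem.Chars.isdigit (p.toList.headD ' ')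
              ∧ PySem.Str.join " " (p :: rest) ≠ name
              ∧ 2 < PySem.Str.len (PySem.Str.join " " (p :: rest))
            then [PySem.Str.join " " (p :: rest)] else []) := by
      simp only [pvStepN, List.getD_cons_zero, List.drop_zero]
      split_ifs <;> simp_all <;> omega
    rw [h0, pvSpec, List.append_assoc]

theorem pvJoin_single (p : String) : PySem.Str.join " " [p] = p := by
  apply String.toList_inj.mp
  simp [PySem.Str.toList_join, PySem.Chars.join_singleton]

theorem pvJoin_cons (p q : String) (rest : List String) :
    PySem.Str.join " " (p :: q :: rest) = p ++ " " ++ PySem.Str.join " " (q :: rest) := by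
  apply String.toList_inj.mp
  simp [PySem.Str.toList_join, String.toList_append, PySem.Chars.join_cons_cons]

-- A's phase 1 equals pvSpec
theorem pvA_phase1 (name : String) (parts : List String) :
    (PySem.List.pyRange 0 parts.length 1).foldl
      (fun res i =>
        if PySem.Chars.isdigit ((PySem.List.pyGetD parts i "").toList.headD ' ') then res
        else
          if PySem.Str.join " " (PySem.List.slice parts (some i) none) ≠ name
              ∧ 2 < PySem.Str.len (PySem.Str.join " " (PySem.List.slice parts (some i) none))
          then res ++ [PySem.Str.join " " (PySem.List.slice parts (some i) none)] else res)
      []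
    = pvSpec name parts := by
  rw [PySem.List.pyRange_one]
  have hb : ((parts.length : Int) - 0).toNat = parts.length := by omega
  rw [hb, List.foldl_map]
  have h1 : (fun (res : List String) (k : Nat) =>
      if PySem.Chars.isdigit ((PySem.List.pyGetD parts ((0 : Int) + (k : Int)) "").toList.headD ' ') then res
      else
        if PySem.Str.join " " (PySem.List.slice parts (some ((0 : Int) + (k : Int))) none) ≠ name
            ∧ 2 < PySem.Str.len (PySem.Str.join " " (PySem.List.slice parts (some ((0 : Int) + (k : Int))) none))
        then res ++ [PySem.Str.join " " (PySem.List.slice parts (some ((0 : Int) + (k : Int))) none)] else res)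
      = pvStepN name parts := by
    funext res k
    have hz : (0 : Int) + (k : Int) = ((k : Nat) : Int) := by omega
    rw [hz]
    simp [pvStepN, PySem.List.pyGetD_natCast, PySem.List.slice_from_natCast]
  rw [h1, pvFoldl_stepN]
  simp

-- head join of a non-empty list, tracked by B's Option accumulator
def pvHeadJoin : List String → Option String
  | [] => none
  | p :: rest => some (PySem.Str.join " " (p :: rest))

-- B's phase 1 (as a foldr) equals (pvHeadJoin, (pvSpec …).reverse)
theorem pvB_phase1 (name : String) :
    ∀ (parts : List String),
      parts.foldr
        (fun part (st : Option String × List String) =>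
          (some (pvExtend part st.1),
            if ¬ PySem.Chars.isdigit (part.toList.headD ' ') ∧ pvExtend part st.1 ≠ name
                ∧ 2 < PySem.Str.len (pvExtend part st.1)
            then st.2 ++ [pvExtend part st.1] else st.2))
        (none, [])
      = (pvHeadJoin parts, (pvSpec name parts).reverse) := by
  intro parts
  induction parts with
  | nil => simp [pvHeadJoin, pvSpec]
  | cons p rest ih =>
    rw [List.foldr_cons, ih]
    cases rest with
    | nil =>
      simp only [pvHeadJoin, pvSpec, pvExtend]
      rw [pvJoin_single]
      split_ifs <;> simp
    | cons q rs =>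
      simp only [pvHeadJoin, pvSpec, pvExtend]
      rw [← pvJoin_cons]
      split_ifs <;> simp

-- phase 2: A's nested-if form and B's single-condition form compute the same fold
theorem pvPhase2_congr (parts res : List String) :
    parts.foldl
      (fun res part =>
        if 3 ≤ PySem.Str.len (PySem.Str.stripChars part "()[]")
            ∧ ¬ PySem.Str.strIsdigit (PySem.Str.stripChars part "()[]")
            ∧ PySem.Chars.isupper ((PySem.Str.stripChars part "()[]").toList.headD ' ') then
          if PySem.Str.stripChars part "()[]" ∈ res then res
          else res ++ [PySem.Str.stripChars part "()[]"]
        else res)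
      res
    = parts.foldl
      (fun res part =>
        if 3 ≤ PySem.Str.len (PySem.Str.stripChars part "()[]")
            ∧ ¬ PySem.Str.strIsdigit (PySem.Str.stripChars part "()[]")
            ∧ PySem.Chars.isupper ((PySem.Str.stripChars part "()[]").toList.headD ' ')
            ∧ PySem.Str.stripChars part "()[]" ∉ res then
          res ++ [PySem.Str.stripChars part "()[]"]
        else res)
      res := by
  have h : (fun (res : List String) (part : String) =>
      if 3 ≤ PySem.Str.len (PySem.Str.stripChars part "()[]")
          ∧ ¬ PySem.Str.strIsdigit (PySem.Str.stripChars part "()[]")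
          ∧ PySem.Chars.isupper ((PySem.Str.stripChars part "()[]").toList.headD ' ') then
        if PySem.Str.stripChars part "()[]" ∈ res then res
        else res ++ [PySem.Str.stripChars part "()[]"]
      else res)
      = (fun (res : List String) (part : String) =>
      if 3 ≤ PySem.Str.len (PySem.Str.stripChars part "()[]")
          ∧ ¬ PySem.Str.strIsdigit (PySem.Str.stripChars part "()[]")
          ∧ PySem.Chars.isupper ((PySem.Str.stripChars part "()[]").toList.headD ' ')
          ∧ PySem.Str.stripChars part "()[]" ∉ res then
        res ++ [PySem.Str.stripChars part "()[]"]
      else res) := by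
    funext res part
    by_cases ha : 3 ≤ PySem.Str.len (PySem.Str.stripChars part "()[]") <;>
    by_cases hb : PySem.Str.strIsdigit (PySem.Str.stripChars part "()[]") = true <;>
    by_cases hc : PySem.Chars.isupper ((PySem.Str.stripChars part "()[]").toList.headD ' ') = true <;>
    by_cases hm : PySem.Str.stripChars part "()[]" ∈ res <;>
    simp [ha, hb, hc, hm]
  rw [h]

-- ===== VERDICT (by name: the statement is the Claim_ definition above) =====
theorem name_subphrases_py_spec : Claim_equal_name_subphrases_py := by
  intro name _
  show name_subphrases_py name = name_subphrases_py_alt name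
  simp only [name_subphrases_py, name_subphrases_py_alt]
  rw [pvA_phase1]
  simp only [List.foldl_reverse]
  rw [pvB_phase1 name]
  simp only [List.reverse_reverse]
  exact pvPhase2_congr (PySem.Str.split₀ name) (pvSpec name (PySem.Str.split₀ name))
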